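-- pv_equiv track=rewrite | github.com/devpro-denny/R_25V1 | telegram_notifier.py | _normalize_strategy_name
-- ===== SOURCE A (Python) =====
-- from typing import Dict, Optional
--
-- def _normalize_strategy_name(
--
--     strategy_value: Optional[str] = None,
--     payload: Optional[Dict] = None,
-- ) -> str:
--     """
--     Normalize strategy labels to one of:
--     - Conservative
--     - Scalping
--     - RiseFall
--     """
--     candidates = []
--     if strategy_value:
--         candidates.append(strategy_value)
--     if isinstance(payload, dict):
--         for key in ("strategy_type", "strategy", "risk_mode", "active_strategy"):
--             value = payload.get(key)
--             if value:
--                 candidates.append(value)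
--
--     for raw in candidates:
--         normalized = str(raw).strip().lower().replace("_", "").replace("/", "")
--         if normalized in {"scalping", "scalp"}:
--             return "Scalping"
--         if normalized in {"risefall", "rf"}:
--             return "RiseFall"
--         if normalized in {"conservative", "topdown", "top-down"}:
--             return "Conservative"
--
--     return "Conservative"
-- ===== SOURCE B (Python) =====
-- # B: instead of a left-to-right first-hit scan with early returns and three
-- # membership branches, process the candidates BACK TO FRONT with an accumulator:
-- # start from the default and let each candidate override the suffix's answer iff
-- # it maps through one flat alias table; the earliest match wins by construction.
-- _KEYS = ("strategy_type", "strategy", "risk_mode", "active_strategy")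
-- _ALIAS = {
--     "scalping": "Scalping",
--     "scalp": "Scalping",
--     "risefall": "RiseFall",
--     "rf": "RiseFall",
--     "conservative": "Conservative",
--     "topdown": "Conservative",
--     "top-down": "Conservative",
-- }
--
--
-- def _canon(raw):
--     return str(raw).strip().lower().replace("_", "").replace("/", "")
--
--
-- def _normalize_strategy_name(strategy_value=None, payload=None):
--     cands = [strategy_value] if strategy_value else []
--     if isinstance(payload, dict):
--         cands += [v for v in (payload.get(k) for k in _KEYS) if v]
--     out = "Conservative"
--     for raw in reversed(cands):
--         out = _ALIAS.get(_canon(raw), out)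
--     return out
-- ===== Notes on version B (the rewrite author's own statement) =====
-- stated objective: alternative
-- what changed: A's left-to-right first-hit scan with early returns and three membership-set branches per candidate is replaced by a back-to-front accumulator pass (a right fold): start from the default and let each candidate override the suffix's answer via one flat alias->canonical table, so the earliest match wins without any search or early exit.
import Mathlib
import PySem

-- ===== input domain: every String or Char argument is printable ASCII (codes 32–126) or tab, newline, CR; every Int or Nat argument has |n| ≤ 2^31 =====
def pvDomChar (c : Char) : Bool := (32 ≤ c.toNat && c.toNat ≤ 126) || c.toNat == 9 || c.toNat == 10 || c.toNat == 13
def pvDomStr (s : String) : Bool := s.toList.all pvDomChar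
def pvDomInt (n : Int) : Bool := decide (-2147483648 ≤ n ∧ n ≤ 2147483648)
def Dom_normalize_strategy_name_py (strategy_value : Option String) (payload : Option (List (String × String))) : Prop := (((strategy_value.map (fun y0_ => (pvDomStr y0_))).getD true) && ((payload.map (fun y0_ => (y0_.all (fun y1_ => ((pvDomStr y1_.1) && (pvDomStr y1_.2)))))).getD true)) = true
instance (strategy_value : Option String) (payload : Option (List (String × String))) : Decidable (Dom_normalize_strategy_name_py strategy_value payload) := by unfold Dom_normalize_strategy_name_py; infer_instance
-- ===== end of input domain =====

-- B replaces A's left-to-right first-hit scan (early returns, three membership branches)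
-- by a back-to-front accumulator pass over one flat alias table (objective: alternative).

-- ===== PORT A =====
-- the `for raw in candidates` loop with its three early returns; `normalized` is
-- str(raw).strip().lower().replace("_","").replace("/","") (str(raw) = raw: already a string)
def pvScanA : List String → String
  | [] => "Conservative"
  | raw :: rest =>
    let normalized := PySem.Str.replace (PySem.Str.replace (PySem.Str.lower (PySem.Str.strip raw)) "_" "") "/" ""
    if normalized == "scalping" || normalized == "scalp" then "Scalping"
    else if normalized == "risefall" || normalized == "rf" then "RiseFall"
    else if normalized == "conservative" || normalized == "topdown" || normalized == "top-down" then "Conservative"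
    else pvScanA rest

def normalize_strategy_name_py (strategy_value : Option String) (payload : Option (List (String × String))) : String :=
  let candidates : List String :=
    match strategy_value with
    | some s => if s == "" then [] else [s]    -- `if strategy_value:` truthiness
    | none => []
  let candidates : List String :=
    match payload with
    | some p =>
      let d := PySem.Dict.ofList p
      (["strategy_type", "strategy", "risk_mode", "active_strategy"]).foldl
        (fun acc key =>
          match d.get? key with
          | some v => if v == "" then acc else acc ++ [v]   -- `if value:`
          | none => acc) candidates
    | none => candidates
  pvScanA candidates

-- ===== PORT B =====
def pvAlias : List (String × String) :=
  [("scalping", "Scalping"), ("scalp", "Scalping"),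
   ("risefall", "RiseFall"), ("rf", "RiseFall"),
   ("conservative", "Conservative"), ("topdown", "Conservative"), ("top-down", "Conservative")]

def pvCanon (raw : String) : String :=
  PySem.Str.replace (PySem.Str.replace (PySem.Str.lower (PySem.Str.strip raw)) "_" "") "/" ""

-- B's `for raw in reversed(cands): out = _ALIAS.get(_canon(raw), out)` is a right fold
def normalize_strategy_name_py_alt (strategy_value : Option String) (payload : Option (List (String × String))) : String :=
  let cands : List String :=
    match strategy_value with
    | some s => if s == "" then [] else [s]
    | none => []
  let cands : List String :=
    cands ++
      (match payload with
       | some p =>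
         let d := PySem.Dict.ofList p
         ((["strategy_type", "strategy", "risk_mode", "active_strategy"]).filterMap d.get?).filter
           (fun v => v != "")
       | none => [])
  cands.foldr (fun raw out => (pvAlias.lookup (pvCanon raw)).getD out) "Conservative"

-- ===== PRECONDITION & SPEC =====
def Spec_normalize_strategy_name_py (strategy_value : Option String) (payload : Option (List (String × String))) (out : String) : Prop := out = normalize_strategy_name_py_alt strategy_value payload
instance (strategy_value : Option String) (payload : Option (List (String × String))) (out : String) : Decidable (Spec_normalize_strategy_name_py strategy_value payload out) := by unfold Spec_normalize_strategy_name_py; infer_instance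

-- ===== CLAIM (what is proved, stated in full; the proofs are below) =====
def Claim_equal_normalize_strategy_name_py : Prop := ∀ (strategy_value : Option String) (payload : Option (List (String × String))), Dom_normalize_strategy_name_py strategy_value payload → Spec_normalize_strategy_name_py strategy_value payload (normalize_strategy_name_py strategy_value payload)

-- ===== LEMMAS AND PROOFS =====

-- A's if-chain on one normalized candidate IS one lookup in B's alias table
theorem pvStep_eq (n : String) :
    (if n == "scalping" || n == "scalp" then some "Scalping"
     else if n == "risefall" || n == "rf" then some "RiseFall"
     else if n == "conservative" || n == "topdown" || n == "top-down" then some "Conservative"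
     else none) = pvAlias.lookup n := by
  simp only [Bool.or_eq_true, beq_iff_eq]
  split_ifs with h1 h2 h3
  · rcases h1 with h | h <;> subst h <;> rfl
  · rcases h2 with h | h <;> subst h <;> rfl
  · rcases h3 with (h | h) | h <;> subst h <;> rfl
  · push Not at h1 h2 h3
    obtain ⟨ha, hb⟩ := h1
    obtain ⟨hr, hf⟩ := h2
    obtain ⟨⟨hc, ht⟩, ht2⟩ := h3
    simp [pvAlias, List.lookup, beq_eq_false_iff_ne.mpr ha, beq_eq_false_iff_ne.mpr hb,
      beq_eq_false_iff_ne.mpr hr, beq_eq_false_iff_ne.mpr hf, beq_eq_false_iff_ne.mpr hc,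
      beq_eq_false_iff_ne.mpr ht, beq_eq_false_iff_ne.mpr ht2]

-- A's first-hit scan equals B's back-to-front override fold
theorem pvScan_eq (l : List String) :
    pvScanA l = l.foldr (fun raw out => (pvAlias.lookup (pvCanon raw)).getD out) "Conservative" := by
  induction l with
  | nil => rfl
  | cons raw rest ih =>
    rw [List.foldr_cons, ← pvStep_eq (pvCanon raw)]
    simp only [pvScanA]
    have hnc : PySem.Str.replace (PySem.Str.replace (PySem.Str.lower (PySem.Str.strip raw)) "_" "") "/" "" = pvCanon raw := rfl
    rw [hnc]
    split_ifs <;> simp_all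

-- A's payload foldl builds exactly B's filterMap-then-filter tail (appended to acc)
theorem pvFold_eq (keys : List String) (d : PySem.Dict String String) (acc : List String) :
    keys.foldl
      (fun acc key =>
        match d.get? key with
        | some v => if v == "" then acc else acc ++ [v]
        | none => acc) acc
      = acc ++ (keys.filterMap d.get?).filter (fun v => v != "") := by
  induction keys generalizing acc with
  | nil => simp
  | cons k ks ih =>
    rw [List.foldl_cons, List.filterMap_cons]
    cases d.get? k with
    | none => exact ih acc
    | some v =>
      by_cases hv : v = ""
      · simp only [List.filter_cons, hv]
        rw [ih]; simp
      · simp only [List.filter_cons]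
        rw [ih]
        simp [hv]

-- ===== VERDICT (by name: the statement is the Claim_ definition above) =====
theorem normalize_strategy_name_py_spec : Claim_equal_normalize_strategy_name_py := by
  intro sv pl _
  unfold Spec_normalize_strategy_name_py
  cases pl with
  | none =>
    simp only [normalize_strategy_name_py, normalize_strategy_name_py_alt, pvScan_eq,
      List.append_nil]
  | some p =>
    simp only [normalize_strategy_name_py, normalize_strategy_name_py_alt, pvFold_eq, pvScan_eq]
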